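-- pv_equiv track=rewrite | github.com/amymhaddad/python_workout | ch_2/repeating_letters/repeating_letters.py | count_words_with_repeat_letters
-- ===== SOURCE A (Python) =====
-- def count_words_with_repeat_letters(words):
--     """Return a dictionary that contains each word
--     and the number of repeated letters it contains"""
--
--     repeats = {}
--     counts = []
--
--     for word in words:
--         for letter in word:
--             counter = word.count(letter)
--             counts.append(counter)
--             repeats[word] = max(counts)
--         counts = []
--     return repeats
-- ===== SOURCE B (Python) =====
-- def count_words_with_repeat_letters(words):
--     """Return a dictionary that contains each word
--     and the number of repeated letters it contains"""
--     repeats = {}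
--     for word in words:
--         counts = {}
--         for letter in word:
--             counts[letter] = counts.get(letter, 0) + 1
--         if counts:
--             repeats[word] = max(counts.values())
--     return repeats
-- ===== Notes on version B (the rewrite author's own statement) =====
-- stated objective: faster
-- what changed: Instead of re-scanning the word with word.count for every letter and keeping a growing list of counts whose max is recomputed and re-assigned on each letter, B builds a letter-frequency dictionary in one pass over the word and assigns max(counts.values()) once per non-empty word.
import Mathlib
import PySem

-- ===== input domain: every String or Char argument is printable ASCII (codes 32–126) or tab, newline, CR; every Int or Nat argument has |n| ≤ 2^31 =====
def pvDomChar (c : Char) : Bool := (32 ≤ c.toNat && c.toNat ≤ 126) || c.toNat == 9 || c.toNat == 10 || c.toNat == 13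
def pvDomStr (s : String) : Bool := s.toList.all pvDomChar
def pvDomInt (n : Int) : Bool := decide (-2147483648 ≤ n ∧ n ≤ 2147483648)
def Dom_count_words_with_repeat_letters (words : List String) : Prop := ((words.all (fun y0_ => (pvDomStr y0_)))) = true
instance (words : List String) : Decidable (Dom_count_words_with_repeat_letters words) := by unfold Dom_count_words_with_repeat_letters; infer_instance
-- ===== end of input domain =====

-- B replaces A's per-letter word.count rescans and growing counts list by a one-pass
-- letter-frequency dictionary per word with a single max over its values (faster).

-- ===== PORT A =====
def count_words_with_repeat_letters (words : List String) : List (String × Int) :=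
  (words.foldl
    (fun (repeats : PySem.Dict String Int) word =>
      -- counts is [] at the start of every word: A resets 'counts = []' after each word
      (word.toList.foldl
        (fun (st : PySem.Dict String Int × List Int) letter =>
          let counter : Int := ((PySem.Str.count word (String.singleton letter) : Nat) : Int)
          let counts := st.2 ++ [counter]
          let repeats :=
            match PySem.List.max? counts (fun v => v) with
            | some m => st.1.insert word m
            | none => st.1   -- unreachable: counts is nonempty here, max(counts) cannot raise
          (repeats, counts))
        (repeats, ([] : List Int))).1)
    PySem.Dict.empty).items

-- ===== PORT B =====
def count_words_with_repeat_letters_alt (words : List String) : List (String × Int) :=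
  (words.foldl
    (fun (repeats : PySem.Dict String Int) word =>
      let counts : PySem.Dict Char Int :=
        word.toList.foldl (fun d letter => d.insert letter (d.getD letter 0 + 1))
          PySem.Dict.empty
      if counts.items = [] then repeats   -- 'if counts:' — skip empty words
      else
        match PySem.List.max? counts.values (fun v => v) with
        | some m => repeats.insert word m
        | none => repeats)   -- unreachable: counts is nonempty in this branch
    PySem.Dict.empty).items

-- ===== PRECONDITION & SPEC =====
def Spec_count_words_with_repeat_letters (words : List String) (out : List (String × Int)) : Prop := out = count_words_with_repeat_letters_alt words
instance (words : List String) (out : List (String × Int)) : Decidable (Spec_count_words_with_repeat_letters words out) := by unfold Spec_count_words_with_repeat_letters; infer_instance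

-- ===== CLAIM (what is proved, stated in full; the proofs are below) =====
def Claim_equal_count_words_with_repeat_letters : Prop := ∀ (words : List String), Dom_count_words_with_repeat_letters words → Spec_count_words_with_repeat_letters words (count_words_with_repeat_letters words)

-- ===== LEMMAS AND PROOFS =====

-- str.count with a single-character needle is the character count (fuel-indexed runner)
theorem chars_count_go_single (c : Char) : ∀ (l : List Char) (fuel acc : Nat), l.length ≤ fuel →
    PySem.Chars.count.go [c] fuel l acc = acc + l.count c := by
  intro l
  induction l with
  | nil => intro fuel acc _; cases fuel <;> simp [PySem.Chars.count.go]
  | cons h t ih =>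
    intro fuel acc hf
    cases fuel with
    | zero => simp at hf
    | succ n =>
      have ht : t.length ≤ n := by simp at hf; omega
      show (if ([c].isPrefixOf (h::t)) then PySem.Chars.count.go [c] n (List.drop 1 (h::t)) (acc+1)
            else PySem.Chars.count.go [c] n t acc) = acc + (h::t).count c
      simp only [List.drop_succ_cons, List.drop_zero, ih n _ ht, List.isPrefixOf, Bool.and_true,
        List.count_cons]
      by_cases hc : c = h
      · simp [hc]; omega
      · have h1 : (c == h) = false := by simpa using hc
        have h2 : (h == c) = false := by simpa using Ne.symm hc
        simp [h1, h2]

theorem str_count_single (w : String) (c : Char) :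
    PySem.Str.count w (String.singleton c) = w.toList.count c := by
  have h : (String.singleton c).toList = [c] := by simp
  simp only [PySem.Str.count, h, PySem.Chars.count, List.isEmpty]
  rw [chars_count_go_single c w.toList w.toList.length 0 le_rfl]
  simp

-- two nonempty lists with the same members have the same Python max
theorem max_eq_of_mem_iff (xs ys : List Int) (mx my : Int)
    (hx : PySem.List.max? xs (fun v => v) = some mx)
    (hy : PySem.List.max? ys (fun v => v) = some my)
    (h : ∀ a, a ∈ xs ↔ a ∈ ys) : mx = my :=
  le_antisymm (PySem.List.max?_isMax hy mx ((h mx).1 (PySem.List.max?_mem hx)))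
    (PySem.List.max?_isMax hx my ((h my).2 (PySem.List.max?_mem hy)))

-- A's inner loop: repeated re-insertion of word collapses to one insert of max(counts)
theorem innerA (w : String) : ∀ (ls : List Char) (d : PySem.Dict String Int) (cs : List Int),
    ls ≠ [] →
    (ls.foldl
      (fun (st : PySem.Dict String Int × List Int) letter =>
        let counter : Int := ((PySem.Str.count w (String.singleton letter) : Nat) : Int)
        let counts := st.2 ++ [counter]
        let repeats :=
          match PySem.List.max? counts (fun v => v) with
          | some m => st.1.insert w m
          | none => st.1
        (repeats, counts))
      (d, cs)).1
    = (match PySem.List.max?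
          (cs ++ ls.map (fun l => ((PySem.Str.count w (String.singleton l) : Nat) : Int)))
          (fun v => v) with
       | some m => d.insert w m
       | none => d) := by
  intro ls
  induction ls with
  | nil => intro d cs h; exact absurd rfl h
  | cons x t ih =>
    intro d cs _
    cases t with
    | nil => rfl
    | cons y t' =>
      obtain ⟨m1, hm1⟩ : ∃ m, PySem.List.max?
          (cs ++ [((PySem.Str.count w (String.singleton x) : Nat) : Int)]) (fun v => v) = some m := by
        cases h : PySem.List.max?
            (cs ++ [((PySem.Str.count w (String.singleton x) : Nat) : Int)]) (fun v => v) with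
        | some m => exact ⟨m, rfl⟩
        | none => simp [PySem.List.max?_eq_none_iff] at h
      have step : (List.foldl
          (fun (st : PySem.Dict String Int × List Int) letter =>
            let counter : Int := ((PySem.Str.count w (String.singleton letter) : Nat) : Int)
            let counts := st.2 ++ [counter]
            let repeats :=
              match PySem.List.max? counts (fun v => v) with
              | some m => st.1.insert w m
              | none => st.1
            (repeats, counts))
          (d, cs) (x :: y :: t')).1
        = (List.foldl
          (fun (st : PySem.Dict String Int × List Int) letter =>
            let counter : Int := ((PySem.Str.count w (String.singleton letter) : Nat) : Int)
            let counts := st.2 ++ [counter]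
            let repeats :=
              match PySem.List.max? counts (fun v => v) with
              | some m => st.1.insert w m
              | none => st.1
            (repeats, counts))
          (d.insert w m1, cs ++ [((PySem.Str.count w (String.singleton x) : Nat) : Int)])
          (y :: t')).1 := by
        simp only [List.foldl_cons, hm1]
      rw [step, ih (d.insert w m1) _ (by simp)]
      obtain ⟨m2, hm2⟩ : ∃ m, PySem.List.max?
          ((cs ++ [((PySem.Str.count w (String.singleton x) : Nat) : Int)]) ++
            (y :: t').map (fun l => ((PySem.Str.count w (String.singleton l) : Nat) : Int)))
          (fun v => v) = some m := by
        cases h : PySem.List.max?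
            ((cs ++ [((PySem.Str.count w (String.singleton x) : Nat) : Int)]) ++
              (y :: t').map (fun l => ((PySem.Str.count w (String.singleton l) : Nat) : Int)))
            (fun v => v) with
        | some m => exact ⟨m, rfl⟩
        | none => simp [PySem.List.max?_eq_none_iff] at h
      have harr : cs ++ (x :: y :: t').map
            (fun l => ((PySem.Str.count w (String.singleton l) : Nat) : Int))
          = (cs ++ [((PySem.Str.count w (String.singleton x) : Nat) : Int)]) ++
            (y :: t').map (fun l => ((PySem.Str.count w (String.singleton l) : Nat) : Int)) := by
        simp
      rw [harr, hm2]
      exact PySem.Dict.insert_insert_self d w m1 m2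

-- the per-word steps of the two outer loops agree
theorem step_eq (repeats : PySem.Dict String Int) (w : String) :
    (w.toList.foldl
      (fun (st : PySem.Dict String Int × List Int) letter =>
        let counter : Int := ((PySem.Str.count w (String.singleton letter) : Nat) : Int)
        let counts := st.2 ++ [counter]
        let repeats :=
          match PySem.List.max? counts (fun v => v) with
          | some m => st.1.insert w m
          | none => st.1
        (repeats, counts))
      (repeats, ([] : List Int))).1
    = (let counts : PySem.Dict Char Int :=
        w.toList.foldl (fun d letter => d.insert letter (d.getD letter 0 + 1)) PySem.Dict.empty
       if counts.items = [] then repeats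
       else
         match PySem.List.max? counts.values (fun v => v) with
         | some m => repeats.insert w m
         | none => repeats) := by
  cases hls : w.toList with
  | nil => simp [PySem.Dict.empty]
  | cons c t =>
    rw [innerA w (c :: t) repeats [] (by simp)]
    show (match PySem.List.max?
            ([] ++ (c :: t).map (fun l => ((PySem.Str.count w (String.singleton l) : Nat) : Int)))
            (fun v => v) with
          | some m => repeats.insert w m
          | none => repeats)
        = if (PySem.Dict.counter (c :: t)).items = [] then repeats
          else match PySem.List.max? (PySem.Dict.counter (c :: t)).values (fun v => v) with
          | some m => repeats.insert w m
          | none => repeats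
    have hitems := PySem.Dict.items_counter (c :: t)
    have hcmem : c ∈ PySem.Set.ofList (c :: t) := (PySem.Set.mem_ofList _ _).2 (by simp)
    have hne : (PySem.Dict.counter (c :: t)).items ≠ [] := by
      rw [hitems]
      intro hnil
      rw [List.map_eq_nil_iff] at hnil
      rw [hnil] at hcmem
      simp at hcmem
    rw [if_neg hne]
    have hvals : (PySem.Dict.counter (c :: t)).values
        = (PySem.Set.ofList (c :: t)).map (fun k => ((List.count k (c :: t) : Nat) : Int)) := by
      show (PySem.Dict.counter (c :: t)).items.map (fun p => p.2) = _
      rw [hitems, List.map_map]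
      rfl
    obtain ⟨mx, hmx⟩ : ∃ m, PySem.List.max?
        ([] ++ (c :: t).map (fun l => ((PySem.Str.count w (String.singleton l) : Nat) : Int)))
        (fun v => v) = some m := by
      cases h : PySem.List.max?
          ([] ++ (c :: t).map (fun l => ((PySem.Str.count w (String.singleton l) : Nat) : Int)))
          (fun v => v) with
      | some m => exact ⟨m, rfl⟩
      | none => simp [PySem.List.max?_eq_none_iff] at h
    obtain ⟨my, hmy⟩ : ∃ m, PySem.List.max? ((PySem.Dict.counter (c :: t)).values)
        (fun v => v) = some m := by
      cases h : PySem.List.max? ((PySem.Dict.counter (c :: t)).values) (fun v => v) with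
      | some m => exact ⟨m, rfl⟩
      | none =>
        rw [PySem.List.max?_eq_none_iff, hvals, List.map_eq_nil_iff] at h
        rw [h] at hcmem; simp at hcmem
    rw [hmx, hmy]
    have hmemiff : ∀ a : Int,
        a ∈ [] ++ (c :: t).map (fun l => ((PySem.Str.count w (String.singleton l) : Nat) : Int))
        ↔ a ∈ (PySem.Dict.counter (c :: t)).values := by
      intro a
      rw [hvals]
      simp only [List.nil_append, List.mem_map, PySem.Set.mem_ofList]
      constructor
      · rintro ⟨l, hl, rfl⟩
        exact ⟨l, hl, by rw [str_count_single, hls]⟩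
      · rintro ⟨l, hl, rfl⟩
        exact ⟨l, hl, by rw [str_count_single, hls]⟩
    rw [max_eq_of_mem_iff _ _ mx my hmx hmy hmemiff]

-- ===== VERDICT (by name: the statement is the Claim_ definition above) =====
theorem count_words_with_repeat_letters_spec : Claim_equal_count_words_with_repeat_letters := by
  intro words _
  unfold Spec_count_words_with_repeat_letters
  unfold count_words_with_repeat_letters count_words_with_repeat_letters_alt
  congr 1
  refine PySem.List.foldl_congr_mem words _ _ _ ?_
  intro acc w _
  exact step_eq acc w
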